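-- pv_equiv track=rewrite | github.com/veoery/Vibe-Blender | src/vibe_blender/agents/editor.py | _build_trimmed_map
-- ===== SOURCE A (Python) =====
-- def _build_trimmed_map(code: str) -> tuple[str, list[int]]:
--     """Build a line-trimmed version of code and a per-line start-offset map.
--
--     Returns:
--         (trimmed_text, orig_line_starts) where orig_line_starts[i] is the
--         character offset of line i in the *original* code.
--     """
--     lines = code.split("\n")
--     orig_starts: list[int] = []
--     offset = 0
--     for line in lines:
--         orig_starts.append(offset)
--         offset += len(line) + 1  # +1 for the \n
--     trimmed = "\n".join(line.rstrip() for line in lines)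
--     return trimmed, orig_starts
-- ===== SOURCE B (Python) =====
-- def _build_trimmed_map(code: str) -> tuple[str, list[int]]:
--     """Build a line-trimmed version of code and a per-line start-offset map."""
--     trimmed = "\n".join(line.rstrip() for line in code.split("\n"))
--     orig_starts = [0] + [i + 1 for i, ch in enumerate(code) if ch == "\n"]
--     return trimmed, orig_starts
-- ===== Notes on version B (the rewrite author's own statement) =====
-- stated objective: alternative
-- what changed: B derives each line-start directly from the positions of newline characters in the raw string ([0] + [i+1 for newline indices]) instead of A's accumulating offset loop over the split lines; the trimmed text is built the same way.
import Mathlib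
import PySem

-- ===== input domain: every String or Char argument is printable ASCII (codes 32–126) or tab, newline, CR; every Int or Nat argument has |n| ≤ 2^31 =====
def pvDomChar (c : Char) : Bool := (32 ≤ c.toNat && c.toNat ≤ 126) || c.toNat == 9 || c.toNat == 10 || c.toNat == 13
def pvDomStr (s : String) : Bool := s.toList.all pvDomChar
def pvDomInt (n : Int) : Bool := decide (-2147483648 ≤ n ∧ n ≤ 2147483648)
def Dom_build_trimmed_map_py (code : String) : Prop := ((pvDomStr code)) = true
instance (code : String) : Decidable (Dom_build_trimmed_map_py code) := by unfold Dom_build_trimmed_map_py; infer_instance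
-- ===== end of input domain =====

-- B computes the per-line start offsets directly from the newline positions of the raw string
-- instead of A's running-offset loop over the split lines (objective: alternative decomposition).

-- ===== PORT A =====
-- lines = code.split("\n"); loop appending offset, offset += len(line)+1; trimmed = "\n".join(line.rstrip() for line in lines)
def build_trimmed_map_py (code : String) : String × List Int :=
  let lines : List (List Char) := PySem.Chars.splitOn code.toList ['\n']
  let p : List Int × Int :=
    lines.foldl (fun (p : List Int × Int) line => (p.1 ++ [p.2], p.2 + (line.length : Int) + 1)) ([], 0)
  let trimmed : String := String.mk (PySem.Chars.join ['\n'] (lines.map PySem.Chars.rstrip))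
  (trimmed, p.1)

-- ===== PORT B =====
-- trimmed = "\n".join(line.rstrip() for line in code.split("\n"));
-- orig_starts = [0] + [i + 1 for i, ch in enumerate(code) if ch == "\n"]
def build_trimmed_map_py_alt (code : String) : String × List Int :=
  let trimmed : String :=
    String.mk (PySem.Chars.join ['\n'] ((PySem.Chars.splitOn code.toList ['\n']).map PySem.Chars.rstrip))
  let orig_starts : List Int :=
    0 :: ((PySem.List.enumerate code.toList 0).filter (fun p => p.2 == '\n')).map (fun p => p.1 + 1)
  (trimmed, orig_starts)

-- ===== PRECONDITION & SPEC =====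
def Spec_build_trimmed_map_py (code : String) (out : String × List Int) : Prop := out = build_trimmed_map_py_alt code
instance (code : String) (out : String × List Int) : Decidable (Spec_build_trimmed_map_py code out) := by unfold Spec_build_trimmed_map_py; infer_instance

-- ===== CLAIM (what is proved, stated in full; the proofs are below) =====
def Claim_equal_build_trimmed_map_py : Prop := ∀ (code : String), Dom_build_trimmed_map_py code → Spec_build_trimmed_map_py code (build_trimmed_map_py code)

-- ===== LEMMAS AND PROOFS =====

/-- Structural recursion computing Python's `s.split("\n")`. -/
def mySplit : List Char → List (List Char)
  | [] => [[]]
  | c :: cs =>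
    if c = '\n' then [] :: mySplit cs
    else (c :: (mySplit cs).headI) :: (mySplit cs).tail

lemma mySplit_ne_nil (cs : List Char) : mySplit cs ≠ [] := by
  cases cs with
  | nil => simp [mySplit]
  | cons c cs => by_cases h : c = '\n' <;> simp [mySplit, h]

/-- `splitOn.go` with enough fuel computes `mySplit`, with `cur.reverse` prepended to the
first piece and `acc.reverse` in front. -/
lemma go_eq_mySplit : ∀ (fuel : Nat) (l cur : List Char) (acc : List (List Char)),
    l.length < fuel →
    PySem.Chars.splitOn.go ['\n'] fuel l cur acc
      = acc.reverse ++ ((cur.reverse ++ (mySplit l).headI) :: (mySplit l).tail) := by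
  intro fuel
  induction fuel with
  | zero => intro l cur acc h; omega
  | succ fuel ih =>
    intro l cur acc h
    cases l with
    | nil => simp [PySem.Chars.splitOn.go, mySplit]
    | cons c rest =>
      by_cases hc : c = '\n'
      · subst hc
        rw [show PySem.Chars.splitOn.go ['\n'] (fuel+1) ('\n' :: rest) cur acc
              = PySem.Chars.splitOn.go ['\n'] fuel rest [] (cur.reverse :: acc) by
            simp [PySem.Chars.splitOn.go, List.isPrefixOf]]
        rw [ih rest [] (cur.reverse :: acc) (by simpa using Nat.lt_of_succ_lt_succ h)]
        cases hm : mySplit rest with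
        | nil => exact absurd hm (mySplit_ne_nil rest)
        | cons a b => simp [mySplit, hm]
      · rw [show PySem.Chars.splitOn.go ['\n'] (fuel+1) (c :: rest) cur acc
              = PySem.Chars.splitOn.go ['\n'] fuel rest (c :: cur) acc by
            simp [PySem.Chars.splitOn.go, List.isPrefixOf]
            exact fun h => absurd h.symm hc]
        rw [ih rest (c :: cur) acc (by simpa using Nat.lt_of_succ_lt_succ h)]
        simp [mySplit, hc]

lemma splitOn_eq_mySplit (cs : List Char) :
    PySem.Chars.splitOn cs ['\n'] = mySplit cs := by
  have h := go_eq_mySplit (cs.length + 1) cs [] [] (Nat.lt_succ_self _)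
  have hne := mySplit_ne_nil cs
  rw [PySem.Chars.splitOn, h]
  cases hm : mySplit cs with
  | nil => exact absurd hm hne
  | cons p ps => simp

/-- A's running-offset starts for a list of lines, starting at `off`. -/
def startsOf (off : Int) : List (List Char) → List Int
  | [] => []
  | l :: ls => off :: startsOf (off + (l.length : Int) + 1) ls

lemma foldl_starts (lines : List (List Char)) : ∀ (acc : List Int) (off : Int),
    (lines.foldl (fun (p : List Int × Int) line => (p.1 ++ [p.2], p.2 + (line.length : Int) + 1)) (acc, off)).1
      = acc ++ startsOf off lines := by
  induction lines with
  | nil => intro acc off; simp [startsOf]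
  | cons l ls ih => intro acc off; simp [List.foldl, startsOf, ih]

/-- The starts of the split pieces are `off` followed by the successors of the newline positions. -/
lemma startsOf_mySplit (cs : List Char) : ∀ (off : Int),
    startsOf off (mySplit cs)
      = off :: ((PySem.List.enumerate cs off).filter (fun p => p.2 == '\n')).map (fun p => p.1 + 1) := by
  induction cs with
  | nil => intro off; simp [mySplit, startsOf, PySem.List.enumerate]
  | cons c cs ih =>
    intro off
    by_cases hc : c = '\n'
    · subst hc
      rw [show mySplit ('\n' :: cs) = [] :: mySplit cs from by simp [mySplit]]
      rw [show startsOf off ([] :: mySplit cs) = off :: startsOf (off + 1) (mySplit cs) from by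
        simp [startsOf]]
      rw [ih (off + 1)]
      simp [PySem.List.enumerate_cons]
    · have hne := mySplit_ne_nil cs
      cases hm : mySplit cs with
      | nil => exact absurd hm hne
      | cons h t =>
        have ih1 := ih (off + 1)
        rw [hm] at ih1
        simp only [startsOf] at ih1
        have htail : startsOf (off + 1 + (h.length : Int) + 1) t
            = ((PySem.List.enumerate cs (off + 1)).filter (fun p => p.2 == '\n')).map (fun p => p.1 + 1) := by
          exact (List.cons.injEq _ _ _ _).mp ih1 |>.2
        simp only [mySplit, if_neg hc, hm, List.headI, List.tail, startsOf,
          PySem.List.enumerate_cons]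
        rw [List.filter_cons_of_neg (by simpa using hc)]
        rw [← htail]
        congr 2
        simp only [List.length_cons]
        push_cast
        ring

-- ===== VERDICT (by name: the statement is the Claim_ definition above) =====
theorem build_trimmed_map_py_spec : Claim_equal_build_trimmed_map_py := by
  intro code _
  unfold Spec_build_trimmed_map_py build_trimmed_map_py build_trimmed_map_py_alt
  simp only [splitOn_eq_mySplit]
  refine Prod.ext rfl ?_
  simp only [foldl_starts, List.nil_append, startsOf_mySplit]
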